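-- pv_equiv track=rewrite | github.com/masterkapilkumar/IITD-TnP-Notifier | getmail_placement.py | build_email_body
-- ===== SOURCE A (Python) =====
-- def build_email_body(data):
--     body = '<center><table width="770"><tr><td><br>'
--     general = ""
--     visit = ""
--     shortlist = ""
--     file = ""
--     general += '<div align="center"><h2>General Notifications</h2><br>'
--     general += '<table align="center" border="2" cellpadding="2" cellspacing="2" width="100%"><tr><th><font face="Arial, Helvetica, sans-serif">Subject</font></th></tr>'
--     visit += '<div align="center"><h2>Company Visit Schedule</h2><br>'
--     visit += '<table align="center" border="2" cellpadding="2" cellspacing="2" width="100%"><tr> \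
--               <th><font face="Arial, Helvetica, sans-serif">Company Name</font></th> \
--               <th><font face="Arial, Helvetica, sans-serif">Date and Time</font></th> \
--               <th><font face="Arial, Helvetica, sans-serif">Venue</font></th> \
--               <th><font face="Arial, Helvetica, sans-serif">Info</font></th> \
--               </tr>'
--     shortlist += '<div align="center"><h2>Short List</h2><br>'
--     shortlist += '<table align="center" border="2" cellpadding="2" cellspacing="2" width="100%"><tr> \
--               <th><font face="Arial, Helvetica, sans-serif">Link</font></th> \
--               <th><font face="Arial, Helvetica, sans-serif">Company Name</font></th> \
--               <th><font face="Arial, Helvetica, sans-serif">Info</font></th> \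
--               </tr>'
--     file += '<div align="center"><h2>Downloads</h2><br>'
--     file += '<table align="center" border="2" cellpadding="2" cellspacing="2" width="100%"><tr> \
--               <th><font face="Arial, Helvetica, sans-serif">Link</font></th> \
--               <th><font face="Arial, Helvetica, sans-serif">Name</font></th> \
--               <th><font face="Arial, Helvetica, sans-serif">Info</font></th> \
--               </tr>'
--
--     item_body = '<td><center><font face="Arial, Helvetica, sans-serif"> <b>{}</b></font> </center></td>'
--     for item in data:
--         if(item['category'] == "general"):
--             general += '<tr>'
--             general += item_body.format(item['info'])
--             general += '</tr>'
--         elif(item['category'] == "visit"):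
--             visit += '<tr>'
--             visit += item_body.format(item['name'])
--             visit += item_body.format(item['time'])
--             visit += item_body.format(item['venue'])
--             visit += item_body.format(item['info'])
--             visit += '</tr>'
--         elif(item['category'] == "shortlist"):
--             shortlist += '<tr>'
--             shortlist += item_body.format(item['link'])
--             shortlist += item_body.format(item['name'])
--             shortlist += item_body.format(item['info'])
--             shortlist += '</tr>'
--         elif(item['category'] == "file"):
--             file += '<tr>'
--             file += item_body.format(item['link'])
--             file += item_body.format(item['name'])
--             file += item_body.format(item['info'])
--             file += '</tr>'
--
--     general += '</table><br/><br/><br/><br/><br/></div>'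
--     visit += '</table><br/><br/><br/><br/><br/></div>'
--     shortlist += '</table><br/><br/><br/><br/><br/></div>'
--     file += '</table><br/><br/><br/><br/><br/></div>'
--
--     if(general.count('<tr>') > 1):
--         body += general
--     if(visit.count('<tr>') > 1):
--         body += visit
--     if(shortlist.count('<tr>') > 1):
--         body += shortlist
--     if(file.count('<tr>') > 1):
--         body += file
--     body += '</td></tr></table></center>'
--
--     return body
-- ===== SOURCE B (Python) =====
-- def build_email_body(data):
--     item_body = '<td><center><font face="Arial, Helvetica, sans-serif"> <b>{}</b></font> </center></td>'
--     sections = [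
--         ("general",
--          '<div align="center"><h2>General Notifications</h2><br>'
--          '<table align="center" border="2" cellpadding="2" cellspacing="2" width="100%"><tr><th><font face="Arial, Helvetica, sans-serif">Subject</font></th></tr>',
--          ["info"]),
--         ("visit",
--          '<div align="center"><h2>Company Visit Schedule</h2><br>'
--          '<table align="center" border="2" cellpadding="2" cellspacing="2" width="100%"><tr> \
--               <th><font face="Arial, Helvetica, sans-serif">Company Name</font></th> \
--               <th><font face="Arial, Helvetica, sans-serif">Date and Time</font></th> \
--               <th><font face="Arial, Helvetica, sans-serif">Venue</font></th> \
--               <th><font face="Arial, Helvetica, sans-serif">Info</font></th> \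
--               </tr>',
--          ["name", "time", "venue", "info"]),
--         ("shortlist",
--          '<div align="center"><h2>Short List</h2><br>'
--          '<table align="center" border="2" cellpadding="2" cellspacing="2" width="100%"><tr> \
--               <th><font face="Arial, Helvetica, sans-serif">Link</font></th> \
--               <th><font face="Arial, Helvetica, sans-serif">Company Name</font></th> \
--               <th><font face="Arial, Helvetica, sans-serif">Info</font></th> \
--               </tr>',
--          ["link", "name", "info"]),
--         ("file",
--          '<div align="center"><h2>Downloads</h2><br>'
--          '<table align="center" border="2" cellpadding="2" cellspacing="2" width="100%"><tr> \
--               <th><font face="Arial, Helvetica, sans-serif">Link</font></th> \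
--               <th><font face="Arial, Helvetica, sans-serif">Name</font></th> \
--               <th><font face="Arial, Helvetica, sans-serif">Info</font></th> \
--               </tr>',
--          ["link", "name", "info"]),
--     ]
--     parts = ['<center><table width="770"><tr><td><br>']
--     for cat, header, fields in sections:
--         rows = [item for item in data if item['category'] == cat]
--         if rows:
--             parts.append(header)
--             for item in rows:
--                 parts.append('<tr>' + ''.join(item_body.format(item[f]) for f in fields) + '</tr>')
--             parts.append('</table><br/><br/><br/><br/><br/></div>')
--     parts.append('</td></tr></table></center>')
--     return ''.join(parts)
-- ===== Notes on version B (the rewrite author's own statement) =====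
-- stated objective: simpler
-- what changed: Replaced A's four parallel string accumulators filled by one branching loop and tested via count('<tr>')>1 with a table-driven renderer: a per-category config of (header, field list), a filter per section, and a non-empty-bucket test, joining the parts at the end.
import Mathlib
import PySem

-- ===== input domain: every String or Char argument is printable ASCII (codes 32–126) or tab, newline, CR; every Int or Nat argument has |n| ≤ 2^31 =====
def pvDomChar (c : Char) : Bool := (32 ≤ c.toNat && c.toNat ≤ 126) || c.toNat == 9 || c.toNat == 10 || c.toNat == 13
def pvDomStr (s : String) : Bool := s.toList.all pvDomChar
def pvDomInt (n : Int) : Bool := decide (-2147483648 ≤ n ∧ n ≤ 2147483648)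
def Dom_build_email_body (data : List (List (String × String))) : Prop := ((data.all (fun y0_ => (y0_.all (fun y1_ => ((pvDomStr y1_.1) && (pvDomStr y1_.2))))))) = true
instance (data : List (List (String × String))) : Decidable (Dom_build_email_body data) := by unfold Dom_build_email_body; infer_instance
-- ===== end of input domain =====

-- B is a table-driven renderer (per-category config + filter per section) instead of A's four parallel
-- string accumulators with a '<tr>'-count test; same output byte for byte, objective: simpler.

-- ===== PORT A =====
-- item[k]: first-match lookup; Pre_ guarantees the key is present, so the "" default is never used
def pvGetKey (item : List (String × String)) (k : String) : String :=
  ((PySem.Dict.mk item).get? k).getD ""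

-- item_body.format(v)
def pvItemBody (v : String) : String :=
  "<td><center><font face=\"Arial, Helvetica, sans-serif\"> <b>" ++ v ++ "</b></font> </center></td>"

def pvFtr : String := "</table><br/><br/><br/><br/><br/></div>"
def pvh1G : String := "<div align=\"center\"><h2>General Notifications</h2><br>"
def pvh2G : String := "<table align=\"center\" border=\"2\" cellpadding=\"2\" cellspacing=\"2\" width=\"100%\"><tr><th><font face=\"Arial, Helvetica, sans-serif\">Subject</font></th></tr>"
def pvh1V : String := "<div align=\"center\"><h2>Company Visit Schedule</h2><br>"
def pvh2V : String := "<table align=\"center\" border=\"2\" cellpadding=\"2\" cellspacing=\"2\" width=\"100%\"><tr>               <th><font face=\"Arial, Helvetica, sans-serif\">Company Name</font></th>               <th><font face=\"Arial, Helvetica, sans-serif\">Date and Time</font></th>               <th><font face=\"Arial, Helvetica, sans-serif\">Venue</font></th>               <th><font face=\"Arial, Helvetica, sans-serif\">Info</font></th>               </tr>"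
def pvh1S : String := "<div align=\"center\"><h2>Short List</h2><br>"
def pvh2S : String := "<table align=\"center\" border=\"2\" cellpadding=\"2\" cellspacing=\"2\" width=\"100%\"><tr>               <th><font face=\"Arial, Helvetica, sans-serif\">Link</font></th>               <th><font face=\"Arial, Helvetica, sans-serif\">Company Name</font></th>               <th><font face=\"Arial, Helvetica, sans-serif\">Info</font></th>               </tr>"
def pvh1F : String := "<div align=\"center\"><h2>Downloads</h2><br>"
def pvh2F : String := "<table align=\"center\" border=\"2\" cellpadding=\"2\" cellspacing=\"2\" width=\"100%\"><tr>               <th><font face=\"Arial, Helvetica, sans-serif\">Link</font></th>               <th><font face=\"Arial, Helvetica, sans-serif\">Name</font></th>               <th><font face=\"Arial, Helvetica, sans-serif\">Info</font></th>               </tr>"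
def pvHdrG : String := "<div align=\"center\"><h2>General Notifications</h2><br><table align=\"center\" border=\"2\" cellpadding=\"2\" cellspacing=\"2\" width=\"100%\"><tr><th><font face=\"Arial, Helvetica, sans-serif\">Subject</font></th></tr>"
def pvHdrV : String := "<div align=\"center\"><h2>Company Visit Schedule</h2><br><table align=\"center\" border=\"2\" cellpadding=\"2\" cellspacing=\"2\" width=\"100%\"><tr>               <th><font face=\"Arial, Helvetica, sans-serif\">Company Name</font></th>               <th><font face=\"Arial, Helvetica, sans-serif\">Date and Time</font></th>               <th><font face=\"Arial, Helvetica, sans-serif\">Venue</font></th>               <th><font face=\"Arial, Helvetica, sans-serif\">Info</font></th>               </tr>"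
def pvHdrS : String := "<div align=\"center\"><h2>Short List</h2><br><table align=\"center\" border=\"2\" cellpadding=\"2\" cellspacing=\"2\" width=\"100%\"><tr>               <th><font face=\"Arial, Helvetica, sans-serif\">Link</font></th>               <th><font face=\"Arial, Helvetica, sans-serif\">Company Name</font></th>               <th><font face=\"Arial, Helvetica, sans-serif\">Info</font></th>               </tr>"
def pvHdrF : String := "<div align=\"center\"><h2>Downloads</h2><br><table align=\"center\" border=\"2\" cellpadding=\"2\" cellspacing=\"2\" width=\"100%\"><tr>               <th><font face=\"Arial, Helvetica, sans-serif\">Link</font></th>               <th><font face=\"Arial, Helvetica, sans-serif\">Name</font></th>               <th><font face=\"Arial, Helvetica, sans-serif\">Info</font></th>               </tr>"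

-- the loop body of A's 'for item in data', on the state (general, visit, shortlist, file)
def pvStepA (st : String × String × String × String) (item : List (String × String)) :
    String × String × String × String :=
  let g := st.1; let v := st.2.1; let s := st.2.2.1; let f := st.2.2.2
  if pvGetKey item "category" == "general" then
    (g ++ "<tr>" ++ pvItemBody (pvGetKey item "info") ++ "</tr>", v, s, f)
  else if pvGetKey item "category" == "visit" then
    (g, v ++ "<tr>" ++ pvItemBody (pvGetKey item "name") ++ pvItemBody (pvGetKey item "time") ++
        pvItemBody (pvGetKey item "venue") ++ pvItemBody (pvGetKey item "info") ++ "</tr>", s, f)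
  else if pvGetKey item "category" == "shortlist" then
    (g, v, s ++ "<tr>" ++ pvItemBody (pvGetKey item "link") ++ pvItemBody (pvGetKey item "name") ++
        pvItemBody (pvGetKey item "info") ++ "</tr>", f)
  else if pvGetKey item "category" == "file" then
    (g, v, s, f ++ "<tr>" ++ pvItemBody (pvGetKey item "link") ++ pvItemBody (pvGetKey item "name") ++
        pvItemBody (pvGetKey item "info") ++ "</tr>")
  else (g, v, s, f)

def build_email_body (data : List (List (String × String))) : String :=
  let body := "<center><table width=\"770\"><tr><td><br>"
  let st := data.foldl pvStepA
    ("" ++ pvh1G ++ pvh2G, "" ++ pvh1V ++ pvh2V, "" ++ pvh1S ++ pvh2S, "" ++ pvh1F ++ pvh2F)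
  let general := st.1 ++ pvFtr
  let visit := st.2.1 ++ pvFtr
  let shortlist := st.2.2.1 ++ pvFtr
  let file := st.2.2.2 ++ pvFtr
  let body := if PySem.Str.count general "<tr>" > 1 then body ++ general else body
  let body := if PySem.Str.count visit "<tr>" > 1 then body ++ visit else body
  let body := if PySem.Str.count shortlist "<tr>" > 1 then body ++ shortlist else body
  let body := if PySem.Str.count file "<tr>" > 1 then body ++ file else body
  body ++ "</td></tr></table></center>"

-- ===== PORT B =====
def build_email_body_alt (data : List (List (String × String))) : String :=
  let sections : List (String × String × List String) :=
    [("general", pvHdrG, ["info"]),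
     ("visit", pvHdrV, ["name", "time", "venue", "info"]),
     ("shortlist", pvHdrS, ["link", "name", "info"]),
     ("file", pvHdrF, ["link", "name", "info"])]
  let parts := sections.foldl (fun parts sec =>
      let rows := data.filter (fun item => pvGetKey item "category" == sec.1)
      if rows.isEmpty then parts
      else parts ++ [sec.2.1] ++
        rows.map (fun item =>
          "<tr>" ++ PySem.Str.join "" (sec.2.2.map (fun f => pvItemBody (pvGetKey item f))) ++ "</tr>") ++
        ["</table><br/><br/><br/><br/><br/></div>"])
    ["<center><table width=\"770\"><tr><td><br>"]
  PySem.Str.join "" (parts ++ ["</td></tr></table></center>"])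

-- ===== PRECONDITION & SPEC =====
-- Pre_ excludes exactly the inputs where Python A raises KeyError: an item without a
-- 'category' key, or a known-category item missing one of the fields that category renders.
def pvHas (item : List (String × String)) (k : String) : Prop :=
  (PySem.Dict.mk item).contains k = true

def Pre_build_email_body (data : List (List (String × String))) : Prop :=
  ∀ item ∈ data, pvHas item "category" ∧
    (pvGetKey item "category" = "general" → pvHas item "info") ∧
    (pvGetKey item "category" = "visit" →
      pvHas item "name" ∧ pvHas item "time" ∧ pvHas item "venue" ∧ pvHas item "info") ∧
    (pvGetKey item "category" = "shortlist" →
      pvHas item "link" ∧ pvHas item "name" ∧ pvHas item "info") ∧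
    (pvGetKey item "category" = "file" →
      pvHas item "link" ∧ pvHas item "name" ∧ pvHas item "info")

instance (data : List (List (String × String))) : Decidable (Pre_build_email_body data) := by
  unfold Pre_build_email_body pvHas; infer_instance

def pvWitness_build_email_body : (List (List (String × String))) :=
  [[("category", "general"), ("info", "interviews at noon")],
   [("category", "file"), ("link", "l"), ("name", "n"), ("info", "i")]]

def Spec_build_email_body (data : List (List (String × String))) (out : String) : Prop := out = build_email_body_alt data
instance (data : List (List (String × String))) (out : String) : Decidable (Spec_build_email_body data out) := by unfold Spec_build_email_body; infer_instance

-- ===== CLAIM (what is proved, stated in full; the proofs are below) =====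
def Claim_equal_build_email_body : Prop := ∀ (data : List (List (String × String))), Dom_build_email_body data → Pre_build_email_body data → Spec_build_email_body data (build_email_body data)

-- ===== LEMMAS AND PROOFS =====

-- concrete splits of the headers at their single '<tr>'
def pvHaG : String := "<div align=\"center\"><h2>General Notifications</h2><br><table align=\"center\" border=\"2\" cellpadding=\"2\" cellspacing=\"2\" width=\"100%\">"
def pvHbG : String := "<th><font face=\"Arial, Helvetica, sans-serif\">Subject</font></th></tr>"
def pvHaV : String := "<div align=\"center\"><h2>Company Visit Schedule</h2><br><table align=\"center\" border=\"2\" cellpadding=\"2\" cellspacing=\"2\" width=\"100%\">"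
def pvHbV : String := "               <th><font face=\"Arial, Helvetica, sans-serif\">Company Name</font></th>               <th><font face=\"Arial, Helvetica, sans-serif\">Date and Time</font></th>               <th><font face=\"Arial, Helvetica, sans-serif\">Venue</font></th>               <th><font face=\"Arial, Helvetica, sans-serif\">Info</font></th>               </tr>"
def pvHaS : String := "<div align=\"center\"><h2>Short List</h2><br><table align=\"center\" border=\"2\" cellpadding=\"2\" cellspacing=\"2\" width=\"100%\">"
def pvHbS : String := "               <th><font face=\"Arial, Helvetica, sans-serif\">Link</font></th>               <th><font face=\"Arial, Helvetica, sans-serif\">Company Name</font></th>               <th><font face=\"Arial, Helvetica, sans-serif\">Info</font></th>               </tr>"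
def pvHaF : String := "<div align=\"center\"><h2>Downloads</h2><br><table align=\"center\" border=\"2\" cellpadding=\"2\" cellspacing=\"2\" width=\"100%\">"
def pvHbF : String := "               <th><font face=\"Arial, Helvetica, sans-serif\">Link</font></th>               <th><font face=\"Arial, Helvetica, sans-serif\">Name</font></th>               <th><font face=\"Arial, Helvetica, sans-serif\">Info</font></th>               </tr>"

-- ---- ''.join over String lists ----
lemma pvCharsJoin_cons (a : List Char) (l : List (List Char)) :
    PySem.Chars.join [] (a :: l) = a ++ PySem.Chars.join [] l := by
  cases l <;> simp [PySem.Chars.join_singleton, PySem.Chars.join_cons_cons, PySem.Chars.join_nil]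

lemma pvJoin_nil : PySem.Str.join "" ([] : List String) = "" := rfl

lemma pvJoin_cons (a : String) (l : List String) :
    PySem.Str.join "" (a :: l) = a ++ PySem.Str.join "" l := by
  apply String.toList_inj.mp
  simp [PySem.Str.join, pvCharsJoin_cons]

lemma pvJoin_append (l₁ l₂ : List String) :
    PySem.Str.join "" (l₁ ++ l₂) = PySem.Str.join "" l₁ ++ PySem.Str.join "" l₂ := by
  induction l₁ with
  | nil => simp [pvJoin_nil]
  | cons a t ih => simp [pvJoin_cons, ih, String.append_assoc]

-- ---- shared description of what both programs emit ----
def pvFilt (cat : String) (data : List (List (String × String))) : List (List (String × String)) :=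
  data.filter (fun item => pvGetKey item "category" == cat)

def pvRow (fields : List String) (item : List (String × String)) : String :=
  "<tr>" ++ PySem.Str.join "" (fields.map (fun f => pvItemBody (pvGetKey item f))) ++ "</tr>"

def pvRows (cat : String) (fields : List String) (data : List (List (String × String))) : String :=
  PySem.Str.join "" ((pvFilt cat data).map (pvRow fields))

def pvSec (cat : String) (fields : List String) (hdr : String)
    (data : List (List (String × String))) : String :=
  if (pvFilt cat data).isEmpty then "" else hdr ++ pvRows cat fields data ++ pvFtr

def pvCanon (data : List (List (String × String))) : String :=
  "<center><table width=\"770\"><tr><td><br>" ++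
    pvSec "general" ["info"] pvHdrG data ++
    pvSec "visit" ["name", "time", "venue", "info"] pvHdrV data ++
    pvSec "shortlist" ["link", "name", "info"] pvHdrS data ++
    pvSec "file" ["link", "name", "info"] pvHdrF data ++
    "</td></tr></table></center>"

lemma pvRows_cons (cat : String) (flds : List String) (item : List (String × String))
    (rest : List (List (String × String))) :
    pvRows cat flds (item :: rest) =
      (if pvGetKey item "category" == cat then pvRow flds item else "") ++ pvRows cat flds rest := by
  by_cases h : pvGetKey item "category" == cat <;>
    simp [pvRows, pvFilt, h, pvJoin_cons]

-- ---- A's loop invariant ----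
lemma pvLoopA (data : List (List (String × String))) :
    ∀ (g v s f : String),
      data.foldl pvStepA (g, v, s, f) =
        (g ++ pvRows "general" ["info"] data,
         v ++ pvRows "visit" ["name", "time", "venue", "info"] data,
         s ++ pvRows "shortlist" ["link", "name", "info"] data,
         f ++ pvRows "file" ["link", "name", "info"] data) := by
  induction data with
  | nil => intro g v s f; simp [pvRows, pvFilt, pvJoin_nil]
  | cons item rest ih =>
    intro g v s f
    simp only [List.foldl_cons, pvStepA, pvRows_cons]
    by_cases h1 : pvGetKey item "category" == "general"
    · have e1 : ¬ (pvGetKey item "category" == "visit") = true := by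
        simp_all [beq_iff_eq]
      have e2 : ¬ (pvGetKey item "category" == "shortlist") = true := by
        simp_all [beq_iff_eq]
      have e3 : ¬ (pvGetKey item "category" == "file") = true := by
        simp_all [beq_iff_eq]
      simp [h1, e1, e2, e3, ih, pvRow, pvJoin_cons, pvJoin_nil, String.append_assoc]
    · by_cases h2 : pvGetKey item "category" == "visit"
      · have e2 : ¬ (pvGetKey item "category" == "shortlist") = true := by simp_all [beq_iff_eq]
        have e3 : ¬ (pvGetKey item "category" == "file") = true := by simp_all [beq_iff_eq]
        simp [h1, h2, e2, e3, ih, pvRow, pvJoin_cons, pvJoin_nil, String.append_assoc]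
      · by_cases h3 : pvGetKey item "category" == "shortlist"
        · have e3 : ¬ (pvGetKey item "category" == "file") = true := by simp_all [beq_iff_eq]
          simp [h1, h2, h3, e3, ih, pvRow, pvJoin_cons, pvJoin_nil, String.append_assoc]
        · by_cases h4 : pvGetKey item "category" == "file"
          · simp [h1, h2, h3, h4, ih, pvRow, pvJoin_cons, pvJoin_nil, String.append_assoc]
          · simp [h1, h2, h3, h4, ih]

-- ---- Python's greedy substring count: two visible occurrences make count ≥ 2 ----
lemma pvGo_zero (sub s : List Char) (acc : Nat) : PySem.Chars.count.go sub 0 s acc = acc := rfl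
lemma pvGo_nil (sub : List Char) (f acc : Nat) : PySem.Chars.count.go sub (f + 1) [] acc = acc := rfl
lemma pvGo_cons (sub : List Char) (c : Char) (t : List Char) (f acc : Nat) :
    PySem.Chars.count.go sub (f + 1) (c :: t) acc =
      if sub.isPrefixOf (c :: t) then
        PySem.Chars.count.go sub f (List.drop sub.length (c :: t)) (acc + 1)
      else PySem.Chars.count.go sub f t acc := rfl

lemma pvGo_ge (sub : List Char) : ∀ (fuel : Nat) (s : List Char) (acc : Nat),
    acc ≤ PySem.Chars.count.go sub fuel s acc := by
  intro fuel
  induction fuel with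
  | zero => intro s acc; simp [pvGo_zero]
  | succ f ih =>
    intro s acc
    cases s with
    | nil => simp [pvGo_nil]
    | cons c t =>
      rw [pvGo_cons]
      split
      · exact le_trans (Nat.le_succ acc) (ih _ _)
      · exact ih _ _

lemma pvGo_start (sub : List Char) (hsub : sub ≠ []) (f acc : Nat) (v : List Char) :
    PySem.Chars.count.go sub (f + 1) (sub ++ v) acc = PySem.Chars.count.go sub f v (acc + 1) := by
  obtain ⟨c, cs, rfl⟩ := List.exists_cons_of_ne_nil hsub
  rw [List.cons_append, pvGo_cons]
  have h1 : c :: (cs ++ v) = (c :: cs) ++ v := by simp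
  rw [h1, if_pos (by rw [List.isPrefixOf_iff_prefix]; exact List.prefix_append _ _), List.drop_left]

lemma pvGo_one (sub : List Char) (hsub : sub ≠ []) :
    ∀ (fuel : Nat) (u v : List Char) (acc : Nat),
      (u ++ (sub ++ v)).length ≤ fuel →
      acc + 1 ≤ PySem.Chars.count.go sub fuel (u ++ (sub ++ v)) acc := by
  intro fuel
  induction fuel with
  | zero =>
    intro u v acc hlen
    have h1 : 1 ≤ sub.length := List.length_pos_of_ne_nil hsub
    simp only [List.length_append] at hlen
    omega
  | succ f ih =>
    intro u v acc hlen
    cases u with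
    | nil =>
      rw [List.nil_append, pvGo_start sub hsub]
      exact pvGo_ge _ _ _ _
    | cons a u' =>
      simp only [List.cons_append]
      rw [pvGo_cons]
      split
      · exact pvGo_ge _ _ _ _
      · apply ih
        simp only [List.cons_append, List.length_cons] at hlen
        omega

lemma pvGo_two (sub : List Char) (hsub : sub ≠ []) :
    ∀ (fuel : Nat) (x y z : List Char) (acc : Nat),
      (x ++ (sub ++ (y ++ (sub ++ z)))).length ≤ fuel →
      acc + 2 ≤ PySem.Chars.count.go sub fuel (x ++ (sub ++ (y ++ (sub ++ z)))) acc := by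
  intro fuel
  induction fuel with
  | zero =>
    intro x y z acc hlen
    have h1 : 1 ≤ sub.length := List.length_pos_of_ne_nil hsub
    simp only [List.length_append] at hlen
    omega
  | succ f ih =>
    intro x y z acc hlen
    have hslen : 1 ≤ sub.length := List.length_pos_of_ne_nil hsub
    cases x with
    | nil =>
      rw [List.nil_append, pvGo_start sub hsub]
      have := pvGo_one sub hsub f y z (acc + 1) (by
        simp only [List.nil_append, List.length_append] at hlen ⊢
        omega)
      omega
    | cons a x' =>
      simp only [List.cons_append]
      rw [pvGo_cons]
      split
      · -- an occurrence was consumed; the second stated occurrence is still wholly ahead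
        have hshape : List.drop sub.length (a :: (x' ++ (sub ++ (y ++ (sub ++ z))))) =
            (List.drop sub.length ((a :: x') ++ sub) ++ y) ++ (sub ++ z) := by
          have h1 : (a :: (x' ++ (sub ++ (y ++ (sub ++ z))))) =
              ((a :: x') ++ sub) ++ (y ++ (sub ++ z)) := by simp
          rw [h1, List.drop_append_of_le_length (by simp only [List.length_append, List.length_cons]; omega)]
          simp [List.append_assoc]
        rw [hshape]
        have := pvGo_one sub hsub f (List.drop sub.length ((a :: x') ++ sub) ++ y) z (acc + 1) (by
          simp only [List.length_append, List.length_drop, List.length_cons] at hlen ⊢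
          omega)
        have h2 : (List.drop sub.length ((a :: x') ++ sub) ++ y) ++ (sub ++ z) =
            List.drop sub.length ((a :: x') ++ sub) ++ y ++ (sub ++ z) := rfl
        omega
      · apply ih
        simp only [List.length_cons, List.length_append] at hlen ⊢
        omega

lemma pvCount_two (x y z : String) :
    1 < PySem.Str.count (x ++ ("<tr>" ++ (y ++ ("<tr>" ++ z)))) "<tr>" := by
  have hsub : ("<tr>" : String).toList ≠ [] := by decide
  simp only [PySem.Str.count, PySem.Chars.count, String.toList_append]
  rw [if_neg (by decide)]
  have h := pvGo_two ("<tr>" : String).toList hsub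
      (x.toList ++ (("<tr>" : String).toList ++ (y.toList ++ (("<tr>" : String).toList ++ z.toList)))).length
      x.toList y.toList z.toList 0 le_rfl
  omega

-- pull 'if c then b ++ x else b' apart
lemma pvIteAppend (c : Prop) [Decidable c] (b x : String) :
    (if c then b ++ x else b) = b ++ (if c then x else "") := by
  split <;> simp

-- one section of A: the '<tr>'-count test agrees with the bucket-emptiness test
lemma pvSec_eq (cat : String) (flds : List String) (ha hb hdr : String)
    (hsplit : hdr = ha ++ ("<tr>" ++ hb))
    (hempty : ¬ 1 < PySem.Str.count (hdr ++ pvFtr) "<tr>")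
    (data : List (List (String × String))) :
    (if 1 < PySem.Str.count (hdr ++ pvRows cat flds data ++ pvFtr) "<tr>"
      then hdr ++ pvRows cat flds data ++ pvFtr else "") = pvSec cat flds hdr data := by
  rcases h : pvFilt cat data with _ | ⟨it, rest⟩
  · have hr : pvRows cat flds data = "" := by simp [pvRows, h, pvJoin_nil]
    have he : hdr ++ pvRows cat flds data ++ pvFtr = hdr ++ pvFtr := by rw [hr]; simp
    rw [he, if_neg hempty]
    simp [pvSec, h]
  · have hr : pvRows cat flds data =
        "<tr>" ++ ((PySem.Str.join "" (flds.map (fun f => pvItemBody (pvGetKey it f))) ++ "</tr>") ++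
          PySem.Str.join "" (rest.map (pvRow flds))) := by
      simp [pvRows, h, pvJoin_cons, pvRow, String.append_assoc]
    have hcond : 1 < PySem.Str.count (hdr ++ pvRows cat flds data ++ pvFtr) "<tr>" := by
      rw [hr, hsplit]
      have := pvCount_two ha hb
        (((PySem.Str.join "" (flds.map (fun f => pvItemBody (pvGetKey it f))) ++ "</tr>") ++
          PySem.Str.join "" (rest.map (pvRow flds))) ++ pvFtr)
      simpa [String.append_assoc] using this
    rw [if_pos hcond]
    simp [pvSec, h]

set_option maxRecDepth 100000 in
set_option maxHeartbeats 2000000 in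
lemma pvA_eq_canon (data : List (List (String × String))) :
    build_email_body data = pvCanon data := by
  have hG : ("" : String) ++ pvh1G ++ pvh2G = pvHdrG := by decide
  have hV : ("" : String) ++ pvh1V ++ pvh2V = pvHdrV := by decide
  have hS : ("" : String) ++ pvh1S ++ pvh2S = pvHdrS := by decide
  have hF : ("" : String) ++ pvh1F ++ pvh2F = pvHdrF := by decide
  simp only [build_email_body, pvLoopA, hG, hV, hS, hF]
  simp only [pvIteAppend]
  rw [pvSec_eq "general" ["info"] pvHaG pvHbG pvHdrG (by decide) (by decide),
      pvSec_eq "visit" ["name", "time", "venue", "info"] pvHaV pvHbV pvHdrV (by decide) (by decide),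
      pvSec_eq "shortlist" ["link", "name", "info"] pvHaS pvHbS pvHdrS (by decide) (by decide),
      pvSec_eq "file" ["link", "name", "info"] pvHaF pvHbF pvHdrF (by decide) (by decide)]
  simp [pvCanon, String.append_assoc]

lemma pvB_eq_canon (data : List (List (String × String))) :
    build_email_body_alt data = pvCanon data := by
  simp only [build_email_body_alt, List.foldl_cons, List.foldl_nil]
  have hjoin : ∀ (parts : List String) (hdr : String) (flds : List String) (cat : String),
      PySem.Str.join ""
        (if (pvFilt cat data).isEmpty then parts
         else parts ++ [hdr] ++ (pvFilt cat data).map (fun item =>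
             "<tr>" ++ PySem.Str.join "" (flds.map (fun f => pvItemBody (pvGetKey item f))) ++ "</tr>") ++
           [pvFtr]) =
      PySem.Str.join "" parts ++ pvSec cat flds hdr data := by
    intro parts hdr flds cat
    have hrow : (fun item => "<tr>" ++ PySem.Str.join ""
        (flds.map (fun f => pvItemBody (pvGetKey item f))) ++ "</tr>") = pvRow flds := rfl
    rcases h : pvFilt cat data with _ | ⟨it, rest⟩
    · simp [pvSec, h]
    · rw [hrow]
      have hne : (pvFilt cat data).isEmpty = false := by rw [h]; rfl
      simp only [hne, Bool.false_eq_true, if_false, pvSec, pvRows]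
      rw [h]
      simp [pvJoin_append, pvJoin_cons, pvJoin_nil, String.append_assoc]
  simp only [pvFilt, pvFtr] at hjoin
  rw [pvJoin_append, hjoin, hjoin, hjoin, hjoin]
  simp [pvJoin_cons, pvJoin_nil, pvCanon, String.append_assoc]

-- ===== VERDICT (by name: the statement is the Claim_ definition above) =====
theorem build_email_body_spec : Claim_equal_build_email_body := by
  intro data _dom _pre
  unfold Spec_build_email_body
  rw [pvA_eq_canon, pvB_eq_canon]
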